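-- pv_equiv track=rewrite | github.com/scawful/afs_scawful | scripts/afs/generate_veran_data.py | generate_basic_explanation
-- ===== SOURCE A (Python) =====
-- def generate_basic_explanation(code: str) -> str:
--     """Generate a basic explanation for code we don't have specific explanations for."""
--     lines = [l.strip() for l in code.strip().split('\n') if l.strip()]
--
--     if not lines:
--         return None
--
--     # Count instruction types
--     has_lda = any(l.startswith('LDA') for l in lines)
--     has_sta = any(l.startswith('STA') for l in lines)
--     has_stz = any(l.startswith('STZ') for l in lines)
--     has_rep = any(l.startswith('REP') for l in lines)
--     has_sep = any(l.startswith('SEP') for l in lines)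
--     has_branch = any(l.startswith(('BEQ', 'BNE', 'BPL', 'BMI', 'BCC', 'BCS', 'BRA')) for l in lines)
--     has_jump = any(l.startswith(('JMP', 'JSR', 'JSL', 'RTL', 'RTS')) for l in lines)
--
--     # Build basic description
--     parts = []
--
--     if has_stz:
--         parts.append("Clears memory locations using STZ (store zero)")
--     elif has_lda and has_sta:
--         parts.append("Loads and stores values between memory locations")
--
--     if has_rep and has_sep:
--         parts.append("switches between 8-bit and 16-bit modes")
--     elif has_rep:
--         parts.append("switches to 16-bit mode")
--     elif has_sep:
--         parts.append("switches to 8-bit mode")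
--
--     if has_branch:
--         parts.append("with conditional branching")
--     if has_jump:
--         parts.append("with jump/call instructions")
--
--     if parts:
--         return f"This code {', '.join(parts)}.\n\n{len(lines)} instructions total."
--
--     return None
-- ===== SOURCE B (Python) =====
-- _CATEGORY = {
--     'LDA': 'lda', 'STA': 'sta', 'STZ': 'stz', 'REP': 'rep', 'SEP': 'sep',
--     'BEQ': 'branch', 'BNE': 'branch', 'BPL': 'branch', 'BMI': 'branch',
--     'BCC': 'branch', 'BCS': 'branch', 'BRA': 'branch',
--     'JMP': 'jump', 'JSR': 'jump', 'JSL': 'jump', 'RTL': 'jump', 'RTS': 'jump',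
-- }
--
-- def generate_basic_explanation(code: str) -> str:
--     """Classify each line's 3-char mnemonic through a lookup table into a set of
--     categories, then build the same report from the category set."""
--     lines = [l.strip() for l in code.strip().split('\n') if l.strip()]
--
--     if not lines:
--         return None
--
--     kinds = set()
--     for l in lines:
--         k = _CATEGORY.get(l[:3])
--         if k is not None:
--             kinds.add(k)
--
--     parts = []
--
--     if 'stz' in kinds:
--         parts.append("Clears memory locations using STZ (store zero)")
--     elif 'lda' in kinds and 'sta' in kinds:
--         parts.append("Loads and stores values between memory locations")
--
--     if 'rep' in kinds and 'sep' in kinds: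
--         parts.append("switches between 8-bit and 16-bit modes")
--     elif 'rep' in kinds:
--         parts.append("switches to 16-bit mode")
--     elif 'sep' in kinds:
--         parts.append("switches to 8-bit mode")
--
--     if 'branch' in kinds:
--         parts.append("with conditional branching")
--     if 'jump' in kinds:
--         parts.append("with jump/call instructions")
--
--     if parts:
--         return f"This code {', '.join(parts)}.\n\n{len(lines)} instructions total."
--
--     return None
-- ===== Notes on version B (the rewrite author's own statement) =====
-- stated objective: alternative
-- what changed: A runs seven separate any(startswith) scans with hard-coded prefix tuples; B makes one classification pass, looking each line's 3-char mnemonic up in an opcode-to-category dict and collecting the set of categories present, from which the same report is built.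
import Mathlib
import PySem

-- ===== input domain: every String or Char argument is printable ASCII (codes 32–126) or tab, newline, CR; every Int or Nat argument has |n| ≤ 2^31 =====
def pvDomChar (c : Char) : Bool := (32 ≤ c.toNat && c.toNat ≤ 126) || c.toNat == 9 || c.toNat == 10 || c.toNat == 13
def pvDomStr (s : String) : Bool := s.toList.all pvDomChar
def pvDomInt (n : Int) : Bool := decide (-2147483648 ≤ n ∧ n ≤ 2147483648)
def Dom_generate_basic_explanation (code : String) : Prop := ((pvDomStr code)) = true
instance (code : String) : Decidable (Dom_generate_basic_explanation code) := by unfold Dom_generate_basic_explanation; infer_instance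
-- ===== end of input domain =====

-- B replaces A's seven per-flag any(startswith) scans by a single classification pass: each
-- line's 3-char mnemonic is looked up in an opcode→category table and the set of categories
-- present drives the same report (objective: alternative decomposition, not claimed faster).

-- [l.strip() for l in code.strip().split('\n')  (sep ≠ "" so split? is always some; getD's [] is unreachable) if l.strip()]
def pvLines (code : String) : List String :=
  (((PySem.Str.split? (PySem.Str.strip code) "\n").getD []).map PySem.Str.strip).filter
    (fun l => l ≠ "")

-- the parts list and final string: this block is identical in both Python sources, kept as one
-- helper body; each port calls it with its own seven booleans (A: any() flags; B: set membership)
def pvReport (lines : List String)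
    (has_lda has_sta has_stz has_rep has_sep has_branch has_jump : Bool) : Option String :=
  let parts : List String := []
  let parts := if has_stz then parts ++ ["Clears memory locations using STZ (store zero)"]
    else if has_lda && has_sta then parts ++ ["Loads and stores values between memory locations"]
    else parts
  let parts := if has_rep && has_sep then parts ++ ["switches between 8-bit and 16-bit modes"]
    else if has_rep then parts ++ ["switches to 16-bit mode"]
    else if has_sep then parts ++ ["switches to 8-bit mode"]
    else parts
  let parts := if has_branch then parts ++ ["with conditional branching"] else parts
  let parts := if has_jump then parts ++ ["with jump/call instructions"] else parts
  if parts ≠ [] then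
    some ("This code " ++ PySem.Str.join ", " parts ++ ".\n\n" ++
      PySem.Int.toStr (lines.length : Int) ++ " instructions total.")
  else none

-- ===== PORT A =====
-- l.startswith((p1, …, pn))  — Python: true iff some prefix matches
def pvStartswithAny (l : String) (ps : List String) : Bool :=
  ps.any (fun p => PySem.Str.startswith l p)

def generate_basic_explanation (code : String) : Option String :=
  let lines := pvLines code
  if lines = [] then none
  else
    let has_lda := lines.any (fun l => PySem.Str.startswith l "LDA")
    let has_sta := lines.any (fun l => PySem.Str.startswith l "STA")
    let has_stz := lines.any (fun l => PySem.Str.startswith l "STZ")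
    let has_rep := lines.any (fun l => PySem.Str.startswith l "REP")
    let has_sep := lines.any (fun l => PySem.Str.startswith l "SEP")
    let has_branch := lines.any (fun l =>
      pvStartswithAny l ["BEQ", "BNE", "BPL", "BMI", "BCC", "BCS", "BRA"])
    let has_jump := lines.any (fun l => pvStartswithAny l ["JMP", "JSR", "JSL", "RTL", "RTS"])
    pvReport lines has_lda has_sta has_stz has_rep has_sep has_branch has_jump

-- ===== PORT B =====
-- the module-level _CATEGORY dict: 3-char mnemonic → category name
def pvCategory : PySem.Dict String String :=
  PySem.Dict.ofList
    [("LDA", "lda"), ("STA", "sta"), ("STZ", "stz"), ("REP", "rep"), ("SEP", "sep"),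
     ("BEQ", "branch"), ("BNE", "branch"), ("BPL", "branch"), ("BMI", "branch"),
     ("BCC", "branch"), ("BCS", "branch"), ("BRA", "branch"),
     ("JMP", "jump"), ("JSR", "jump"), ("JSL", "jump"), ("RTL", "jump"), ("RTS", "jump")]

def generate_basic_explanation_alt (code : String) : Option String :=
  let lines := pvLines code
  if lines = [] then none
  else
    -- kinds = set(); for l in lines: k = _CATEGORY.get(l[:3]); if k is not None: kinds.add(k)
    let kinds : PySem.Set String := lines.foldl (fun s l =>
      match PySem.Dict.get? pvCategory (PySem.Str.slice l none (some 3)) with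
      | some k => PySem.Set.add s k
      | none => s) PySem.Set.empty
    pvReport lines (PySem.Set.contains kinds "lda") (PySem.Set.contains kinds "sta")
      (PySem.Set.contains kinds "stz") (PySem.Set.contains kinds "rep")
      (PySem.Set.contains kinds "sep") (PySem.Set.contains kinds "branch")
      (PySem.Set.contains kinds "jump")

-- ===== PRECONDITION & SPEC =====
def Spec_generate_basic_explanation (code : String) (out : Option String) : Prop := out = generate_basic_explanation_alt code
instance (code : String) (out : Option String) : Decidable (Spec_generate_basic_explanation code out) := by unfold Spec_generate_basic_explanation; infer_instance

-- ===== CLAIM (what is proved, stated in full; the proofs are below) =====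
def Claim_equal_generate_basic_explanation : Prop := ∀ (code : String), Dom_generate_basic_explanation code → Spec_generate_basic_explanation code (generate_basic_explanation code)

-- ===== LEMMAS AND PROOFS =====

-- the _CATEGORY dict as a literal association list (insertion builds it with no overwrites)
set_option maxHeartbeats 1000000 in
theorem pvCategory_mk : pvCategory = PySem.Dict.mk
    [("LDA", "lda"), ("STA", "sta"), ("STZ", "stz"), ("REP", "rep"), ("SEP", "sep"),
     ("BEQ", "branch"), ("BNE", "branch"), ("BPL", "branch"), ("BMI", "branch"),
     ("BCC", "branch"), ("BCS", "branch"), ("BRA", "branch"),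
     ("JMP", "jump"), ("JSR", "jump"), ("JSL", "jump"), ("RTL", "jump"), ("RTS", "jump")] := rfl

-- lookup-then-compare on a duplicate-free association list is a key/value scan
theorem pvGet?_beq (ps : List (String × String)) (t v : String)
    (hnd : (ps.map Prod.fst).Nodup) :
    ((PySem.Dict.mk ps).get? t == some v) = ps.any (fun p => p.1 == t && p.2 == v) := by
  induction ps with
  | nil => simp [PySem.Dict.get?]
  | cons p rest ih =>
    obtain ⟨k, w⟩ := p
    simp only [List.map_cons, List.nodup_cons] at hnd
    rw [List.any_cons, PySem.Dict.get?_mk_cons]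
    by_cases h : k = t
    · subst h
      have hne : ∀ q ∈ rest, (q.1 == k && q.2 == v) = false := by
        intro q hq
        have : q.1 ≠ k := fun he => hnd.1 (he ▸ List.mem_map_of_mem hq)
        simp [beq_false_of_ne this]
      have hrest : rest.any (fun p => p.1 == k && p.2 == v) = false := by
        rw [List.any_eq_false]; intro q hq; simp [hne q hq]
      rw [hrest]; simp
    · simp [beq_false_of_ne h, ih hnd.2]

-- a 3-char prefix test is an equality test against the 3-char slice
theorem pvStartswith_eq_slice3 (l p : String) (hp : p.toList.length = 3) :
    PySem.Str.startswith l p = (p == PySem.Str.slice l none (some 3)) := by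
  rw [Bool.eq_iff_iff, beq_iff_eq, String.ext_iff]
  simp [pysem, PySem.Chars.startswith_iff, List.prefix_iff_eq_take, hp]

-- membership in B's classification fold = some line classifies to that category
theorem pvMem_foldKinds (v : String) (lines : List String) (s : PySem.Set String) :
    PySem.Set.contains
      (lines.foldl (fun s l =>
        match PySem.Dict.get? pvCategory (PySem.Str.slice l none (some 3)) with
        | some k => PySem.Set.add s k
        | none => s) s) v =
    (PySem.Set.contains s v ||
      lines.any (fun l => PySem.Dict.get? pvCategory (PySem.Str.slice l none (some 3)) == some v)) := by
  induction lines generalizing s with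
  | nil => simp
  | cons x xs ih =>
    rw [List.foldl_cons, ih]
    have hsymm : ∀ a b : String, (a == b) = decide (b = a) := by
      intro a b; rw [Bool.eq_iff_iff]; simp only [beq_iff_eq, decide_eq_true_eq]; exact eq_comm
    cases h : PySem.Dict.get? pvCategory (PySem.Str.slice x none (some 3)) <;>
      simp [h, pysem, hsymm, Bool.or_assoc, Bool.or_comm, Bool.or_left_comm]

-- per-line classification facts: a dict lookup compared to a category = A's prefix test(s)
theorem pvLine_lda (l : String) :
    (PySem.Dict.get? pvCategory (PySem.Str.slice l none (some 3)) == some "lda") =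
      PySem.Str.startswith l "LDA" := by
  rw [pvCategory_mk, pvGet?_beq _ _ _ (by decide), pvStartswith_eq_slice3 _ _ (by decide)]
  simp

theorem pvLine_sta (l : String) :
    (PySem.Dict.get? pvCategory (PySem.Str.slice l none (some 3)) == some "sta") =
      PySem.Str.startswith l "STA" := by
  rw [pvCategory_mk, pvGet?_beq _ _ _ (by decide), pvStartswith_eq_slice3 _ _ (by decide)]
  simp

theorem pvLine_stz (l : String) :
    (PySem.Dict.get? pvCategory (PySem.Str.slice l none (some 3)) == some "stz") =
      PySem.Str.startswith l "STZ" := by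
  rw [pvCategory_mk, pvGet?_beq _ _ _ (by decide), pvStartswith_eq_slice3 _ _ (by decide)]
  simp

theorem pvLine_rep (l : String) :
    (PySem.Dict.get? pvCategory (PySem.Str.slice l none (some 3)) == some "rep") =
      PySem.Str.startswith l "REP" := by
  rw [pvCategory_mk, pvGet?_beq _ _ _ (by decide), pvStartswith_eq_slice3 _ _ (by decide)]
  simp

theorem pvLine_sep (l : String) :
    (PySem.Dict.get? pvCategory (PySem.Str.slice l none (some 3)) == some "sep") =
      PySem.Str.startswith l "SEP" := by
  rw [pvCategory_mk, pvGet?_beq _ _ _ (by decide), pvStartswith_eq_slice3 _ _ (by decide)]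
  simp

theorem pvLine_branch (l : String) :
    (PySem.Dict.get? pvCategory (PySem.Str.slice l none (some 3)) == some "branch") =
      pvStartswithAny l ["BEQ", "BNE", "BPL", "BMI", "BCC", "BCS", "BRA"] := by
  rw [pvCategory_mk, pvGet?_beq _ _ _ (by decide)]
  unfold pvStartswithAny
  simp only [List.any_cons, List.any_nil]
  rw [pvStartswith_eq_slice3 l "BEQ" (by decide), pvStartswith_eq_slice3 l "BNE" (by decide),
    pvStartswith_eq_slice3 l "BPL" (by decide), pvStartswith_eq_slice3 l "BMI" (by decide),
    pvStartswith_eq_slice3 l "BCC" (by decide), pvStartswith_eq_slice3 l "BCS" (by decide),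
    pvStartswith_eq_slice3 l "BRA" (by decide)]
  simp

theorem pvLine_jump (l : String) :
    (PySem.Dict.get? pvCategory (PySem.Str.slice l none (some 3)) == some "jump") =
      pvStartswithAny l ["JMP", "JSR", "JSL", "RTL", "RTS"] := by
  rw [pvCategory_mk, pvGet?_beq _ _ _ (by decide)]
  unfold pvStartswithAny
  simp only [List.any_cons, List.any_nil]
  rw [pvStartswith_eq_slice3 l "JMP" (by decide), pvStartswith_eq_slice3 l "JSR" (by decide),
    pvStartswith_eq_slice3 l "JSL" (by decide), pvStartswith_eq_slice3 l "RTL" (by decide),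
    pvStartswith_eq_slice3 l "RTS" (by decide)]
  simp

-- ===== VERDICT (by name: the statement is the Claim_ definition above) =====
theorem generate_basic_explanation_spec : Claim_equal_generate_basic_explanation := by
  intro code _
  show generate_basic_explanation code = generate_basic_explanation_alt code
  unfold generate_basic_explanation generate_basic_explanation_alt
  by_cases h : pvLines code = []
  · rw [if_pos h, if_pos h]
  · rw [if_neg h, if_neg h]
    have hempty : ∀ v : String, PySem.Set.contains PySem.Set.empty v = false := by
      intro v; simp [pysem, PySem.Set.contains, PySem.Set.empty]
    simp only [pvMem_foldKinds, hempty, Bool.false_or,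
      funext pvLine_lda, funext pvLine_sta, funext pvLine_stz, funext pvLine_rep,
      funext pvLine_sep, funext pvLine_branch, funext pvLine_jump]
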